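-- pv_equiv track=rewrite | github.com/amararora07/CodeFights | stolenLunch.py | stolenLunch
-- ===== SOURCE A (Python) =====
-- def stolenLunch(n):
--     s=""
--     for i in range(len(n)):
--         if 48<=ord(n[i])<=57:
--             c=chr(ord(n[i])-48)
--             s+=chr(ord(c)+97)
--         elif 97<=ord(n[i])<=106:
--             c=chr(ord(n[i])-97)
--             s+=chr(ord(c)+48)
--         else:
--             s+=n[i]
--     return s
-- ===== SOURCE B (Python) =====
-- def stolenLunch(n):
--     # Staged whole-string substitution: move digits to control-char placeholders
--     # (codes 14-23, which never occur in printable text), then letters a-j to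
--     # digits, then placeholders to letters.  No per-character branching.
--     s = n
--     for d in range(10):
--         s = s.replace(chr(48 + d), chr(14 + d))
--     for d in range(10):
--         s = s.replace(chr(97 + d), chr(48 + d))
--     for d in range(10):
--         s = s.replace(chr(14 + d), chr(97 + d))
--     return s
-- ===== Notes on version B (the rewrite author's own statement) =====
-- stated objective: faster
-- what changed: Replaces A's per-character if/elif loop with string concatenation by three staged whole-string replace passes over the alphabet (digits -> control-char placeholders, letters a-j -> digits, placeholders -> letters), with no per-character Python loop at all.
import Mathlib
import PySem

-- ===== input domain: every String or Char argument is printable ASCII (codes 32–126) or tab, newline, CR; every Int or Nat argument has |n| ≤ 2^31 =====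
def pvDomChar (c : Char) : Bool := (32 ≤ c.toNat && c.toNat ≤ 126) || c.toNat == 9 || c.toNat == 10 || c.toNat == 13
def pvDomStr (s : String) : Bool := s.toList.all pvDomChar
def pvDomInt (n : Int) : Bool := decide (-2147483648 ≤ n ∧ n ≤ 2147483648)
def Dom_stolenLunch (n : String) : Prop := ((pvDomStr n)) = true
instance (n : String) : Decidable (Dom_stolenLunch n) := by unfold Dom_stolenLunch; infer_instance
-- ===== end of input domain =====

-- B replaces A's per-character branch-and-concatenate loop by three staged
-- whole-string replace passes over the alphabet (digits -> placeholders,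
-- a-j -> digits, placeholders -> letters); measurably faster in Python.


-- ===== PORT A =====
-- one iteration of A's loop body: the same three branches, appending to s
def stolenLunchStep (s : List Char) (ch : Char) : List Char :=
  if 48 ≤ ch.toNat ∧ ch.toNat ≤ 57 then
    let c := Char.ofNat (ch.toNat - 48)
    s ++ [Char.ofNat (c.toNat + 97)]
  else if 97 ≤ ch.toNat ∧ ch.toNat ≤ 106 then
    let c := Char.ofNat (ch.toNat - 97)
    s ++ [Char.ofNat (c.toNat + 48)]
  else
    s ++ [ch]

def stolenLunch (n : String) : String :=
  String.ofList (n.toList.foldl stolenLunchStep [])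

-- ===== PORT B =====
-- B's three staged passes: each is a fold of s.replace over range(10)
def stolenLunch_alt (n : String) : String :=
  let s1 := (PySem.List.pyRange 0 10 1).foldl
    (fun s d => PySem.Str.replace s (String.ofList [Char.ofNat (48 + d).toNat]) (String.ofList [Char.ofNat (14 + d).toNat])) n
  let s2 := (PySem.List.pyRange 0 10 1).foldl
    (fun s d => PySem.Str.replace s (String.ofList [Char.ofNat (97 + d).toNat]) (String.ofList [Char.ofNat (48 + d).toNat])) s1
  (PySem.List.pyRange 0 10 1).foldl
    (fun s d => PySem.Str.replace s (String.ofList [Char.ofNat (14 + d).toNat]) (String.ofList [Char.ofNat (97 + d).toNat])) s2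

-- ===== PRECONDITION & SPEC =====
def Spec_stolenLunch (n : String) (out : String) : Prop := out = stolenLunch_alt n
instance (n : String) (out : String) : Decidable (Spec_stolenLunch n out) := by unfold Spec_stolenLunch; infer_instance

-- ===== CLAIM =====
def Claim_equal_stolenLunch : Prop := ∀ (n : String), Dom_stolenLunch n → Spec_stolenLunch n (stolenLunch n)

-- ===== LEMMAS AND PROOFS =====

-- the per-character value A appends
def pvStepChar (ch : Char) : Char :=
  if 48 ≤ ch.toNat ∧ ch.toNat ≤ 57 then Char.ofNat ((Char.ofNat (ch.toNat - 48)).toNat + 97)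
  else if 97 ≤ ch.toNat ∧ ch.toNat ≤ 106 then Char.ofNat ((Char.ofNat (ch.toNat - 97)).toNat + 48)
  else ch

theorem step_eq (s : List Char) (c : Char) :
    stolenLunchStep s c = s ++ [pvStepChar c] := by
  unfold stolenLunchStep pvStepChar
  split_ifs <;> rfl

theorem foldlA_eq (l : List Char) (acc : List Char) :
    l.foldl stolenLunchStep acc = acc ++ l.map pvStepChar := by
  induction l generalizing acc with
  | nil => simp
  | cons x xs ih => simp [List.foldl_cons, step_eq, ih]

-- single-character substitution
def pvSwap1 (a b c : Char) : Char := if c = a then b else c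

theorem replace_go_single (a b : Char) (fuel : Nat) (l acc : List Char)
    (h : l.length ≤ fuel) :
    PySem.Chars.replace.go [a] [b] fuel l acc
      = acc.reverse ++ l.map (pvSwap1 a b) := by
  induction fuel generalizing l acc with
  | zero =>
    have : l = [] := List.length_eq_zero_iff.mp (Nat.le_zero.mp h)
    subst this; simp [PySem.Chars.replace.go]
  | succ fuel ih =>
    cases l with
    | nil => simp [PySem.Chars.replace.go]
    | cons c t =>
      simp only [PySem.Chars.replace.go]
      by_cases hp : [a].isPrefixOf (c :: t) = true
      · have hac : a = c := by
          simp [List.isPrefixOf] at hp; exact hp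
        rw [if_pos hp]
        have ht : t.length ≤ fuel := by simpa using h
        simp only [List.length_cons, List.length_nil, List.drop_succ_cons, List.drop_zero]
        rw [ih _ _ ht]
        subst hac
        simp [pvSwap1, List.map_cons]
      · rw [if_neg hp]
        have hac : ¬ c = a := by
          intro hh; apply hp; simp [List.isPrefixOf, hh]
        have ht : t.length ≤ fuel := by simpa using Nat.le_of_succ_le_succ h
        rw [ih _ _ ht]
        simp [pvSwap1, hac, List.map_cons]

theorem replace_single (a b : Char) (l : List Char) :
    PySem.Chars.replace l [a] [b] = l.map (pvSwap1 a b) := by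
  unfold PySem.Chars.replace
  rw [if_neg (by simp)]
  simpa using replace_go_single a b l.length l [] le_rfl

theorem foldl_replace_toList (ds : List Int) (f g : Int → Char) (s : String) :
    (ds.foldl (fun s d => PySem.Str.replace s (String.ofList [f d]) (String.ofList [g d])) s).toList
      = s.toList.map (fun c => ds.foldl (fun c d => pvSwap1 (f d) (g d) c) c) := by
  induction ds generalizing s with
  | nil => simp
  | cons d ds ih =>
    rw [List.foldl_cons, ih]
    rw [show (PySem.Str.replace s (String.ofList [f d]) (String.ofList [g d])).toList
          = s.toList.map (pvSwap1 (f d) (g d)) by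
        rw [PySem.Str.toList_replace, String.toList_ofList, String.toList_ofList]
        exact replace_single (f d) (g d) s.toList]
    rw [List.map_map]
    rfl

-- the composed per-character function of B's three passes
def pvSwapAll (c : Char) : Char :=
  let c1 := (PySem.List.pyRange 0 10 1).foldl
    (fun c d => pvSwap1 (Char.ofNat (48 + d).toNat) (Char.ofNat (14 + d).toNat) c) c
  let c2 := (PySem.List.pyRange 0 10 1).foldl
    (fun c d => pvSwap1 (Char.ofNat (97 + d).toNat) (Char.ofNat (48 + d).toNat) c) c1
  (PySem.List.pyRange 0 10 1).foldl
    (fun c d => pvSwap1 (Char.ofNat (14 + d).toNat) (Char.ofNat (97 + d).toNat) c) c2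

set_option maxRecDepth 100000 in
theorem alt_toList (n : String) :
    (stolenLunch_alt n).toList = n.toList.map pvSwapAll := by
  have hr : PySem.List.pyRange 0 10 1 = [0,1,2,3,4,5,6,7,8,9] := by decide
  unfold stolenLunch_alt
  rw [foldl_replace_toList, foldl_replace_toList, foldl_replace_toList,
    List.map_map, List.map_map]
  apply List.map_congr_left
  intro c _
  simp only [Function.comp_apply, pvSwapAll, hr, List.foldl_cons, List.foldl_nil]

set_option maxRecDepth 100000 in
theorem swapAll_eq_step_ofNat :
    ∀ k ∈ Finset.range 127, pvDomChar (Char.ofNat k) = true →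
      pvSwapAll (Char.ofNat k) = pvStepChar (Char.ofNat k) := by
  decide

theorem swapAll_eq_step (c : Char) (h : pvDomChar c = true) :
    pvSwapAll c = pvStepChar c := by
  have hk : c.toNat < 127 := by
    have h' := h
    simp only [pvDomChar, Bool.or_eq_true, Bool.and_eq_true, decide_eq_true_eq,
      beq_iff_eq] at h'
    omega
  have := swapAll_eq_step_ofNat c.toNat (Finset.mem_range.mpr hk)
  rw [Char.ofNat_toNat] at this
  exact this h

-- ===== VERDICT =====
theorem stolenLunch_spec : Claim_equal_stolenLunch := by
  intro n hdom
  unfold Spec_stolenLunch stolenLunch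
  have hall : ∀ c ∈ n.toList, pvDomChar c = true := by
    simpa [Dom_stolenLunch, pvDomStr, List.all_eq_true] using hdom
  have : n.toList.map pvStepChar = n.toList.map pvSwapAll :=
    List.map_congr_left (fun c hc => (swapAll_eq_step c (hall c hc)).symm)
  rw [foldlA_eq, List.nil_append, this, ← alt_toList, String.ofList_toList]
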